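-- pv_equiv track=rewrite | github.com/tira-io/nlpbuw-fsu-sose-24-gruppe-5 | paraphrase-identification/word_similarity.py | get_words_with_count
-- ===== SOURCE A (Python) =====
-- def get_words_with_count(sentence):
--     words = sentence.lower().split()
--     word_count = {}
--     word_set = set()
--     for word in words:
--         if word in word_count:
--             word_count[word] += 1
--         else:
--             word_count[word] = 1
--         word_set.add((word, word_count[word]))
--     return word_set
-- ===== SOURCE B (Python) =====
-- def get_words_with_count(sentence):
--     words = sentence.lower().split()
--     remaining = {}
--     for word in words:
--         remaining[word] = remaining.get(word, 0) + 1
--     result = []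
--     for word in reversed(words):
--         result.append((word, remaining[word]))
--         remaining[word] -= 1
--     result.reverse()
--     return set(result)
-- ===== Notes on version B (the rewrite author's own statement) =====
-- stated objective: alternative
-- what changed: Replaces A's single forward pass that increments a count dict while emitting pairs by a staged decomposition: one pass builds the total word-count table, then a second pass over the words in REVERSE assigns each occurrence its running count by decrementing the remaining totals, and the collected list is reversed at the end.
import Mathlib
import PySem

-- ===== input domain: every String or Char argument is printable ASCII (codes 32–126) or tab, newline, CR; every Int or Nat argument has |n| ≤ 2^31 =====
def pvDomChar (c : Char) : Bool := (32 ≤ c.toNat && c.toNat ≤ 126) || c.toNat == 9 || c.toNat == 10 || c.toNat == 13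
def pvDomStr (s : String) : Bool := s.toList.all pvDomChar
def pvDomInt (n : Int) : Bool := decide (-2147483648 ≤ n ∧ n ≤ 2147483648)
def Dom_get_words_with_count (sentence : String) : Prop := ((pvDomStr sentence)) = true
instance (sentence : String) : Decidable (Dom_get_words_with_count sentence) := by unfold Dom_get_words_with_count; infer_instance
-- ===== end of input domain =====

-- B replaces A's single incrementing-dict pass by a staged decomposition: build the total
-- count table first, then a reverse pass that decrements remaining totals (alternative; not faster).

-- ===== PORT A =====
def get_words_with_count (sentence : String) : List (String × Int) :=
  let words := PySem.Str.split₀ (PySem.Str.lower sentence)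
  (words.foldl
    (fun (st : PySem.Dict String Int × PySem.Set (String × Int)) (word : String) =>
      let wc := if st.1.contains word then st.1.modify word 0 (· + 1) else st.1.insert word 1
      (wc, PySem.Set.add st.2 (word, wc.getD word 0)))
    (PySem.Dict.empty, PySem.Set.empty)).2

-- ===== PORT B =====
def get_words_with_count_alt (sentence : String) : List (String × Int) :=
  let words := PySem.Str.split₀ (PySem.Str.lower sentence)
  -- remaining[word] = remaining.get(word, 0) + 1
  let remaining := words.foldl
    (fun (d : PySem.Dict String Int) (word : String) => d.insert word (d.getD word 0 + 1))
    PySem.Dict.empty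
  -- for word in reversed(words): result.append((word, remaining[word])); remaining[word] -= 1
  -- (reversed(words) is ported as words.reverse, exact for a list)
  let st := words.reverse.foldl
    (fun (st : List (String × Int) × PySem.Dict String Int) (word : String) =>
      (st.1 ++ [(word, st.2.getD word 0)], st.2.insert word (st.2.getD word 0 - 1)))
    ([], remaining)
  PySem.Set.ofList st.1.reverse

-- ===== PRECONDITION & SPEC =====
def Spec_get_words_with_count (sentence : String) (out : List (String × Int)) : Prop := out = get_words_with_count_alt sentence
instance (sentence : String) (out : List (String × Int)) : Decidable (Spec_get_words_with_count sentence out) := by unfold Spec_get_words_with_count; infer_instance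

-- ===== CLAIM (what is proved, stated in full; the proofs are below) =====
def Claim_equal_get_words_with_count : Prop := ∀ (sentence : String), Dom_get_words_with_count sentence → Spec_get_words_with_count sentence (get_words_with_count sentence)

-- ===== LEMMAS AND PROOFS =====

-- the list of (word, running count) pairs in occurrence order, with `pre` the words already seen
def pvExpand (pre suf : List String) : List (String × Int) :=
  match suf with
  | [] => []
  | w :: t => (w, (pre.count w : Int) + 1) :: pvExpand (pre ++ [w]) t

lemma pvExpand_mem (suf : List String) : ∀ (pre : List String) (w : String) (k : Int),
    (w, k) ∈ pvExpand pre suf → (pre.count w : Int) < k ∧ k ≤ ((pre ++ suf).count w : Int) := by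
  induction suf with
  | nil => intro pre w k h; simp [pvExpand] at h
  | cons x t ih =>
    intro pre w k h
    simp only [pvExpand, List.mem_cons, Prod.mk.injEq] at h
    rcases h with ⟨rfl, rfl⟩ | h
    · refine ⟨by omega, ?_⟩
      have h1 : (pre ++ w :: t).count w = pre.count w + (w :: t).count w := List.count_append
      have h2 : 1 ≤ (w :: t).count w := by simp
      omega
    · obtain ⟨hlt, hle⟩ := ih (pre ++ [x]) w k h
      have h1 : (pre ++ [x]).count w = pre.count w + [x].count w := List.count_append
      have h2 : ((pre ++ [x]) ++ t).count w = (pre ++ (x :: t)).count w := by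
        rw [List.append_assoc]; rfl
      rw [h2] at hle
      refine ⟨?_, hle⟩
      rw [h1] at hlt; push_cast at hlt ⊢; omega

lemma pvExpand_nodup (suf : List String) : ∀ (pre : List String), (pvExpand pre suf).Nodup := by
  induction suf with
  | nil => intro pre; simp [pvExpand]
  | cons x t ih =>
    intro pre
    simp only [pvExpand, List.nodup_cons]
    refine ⟨fun hmem => ?_, ih (pre ++ [x])⟩
    have h1 := (pvExpand_mem t (pre ++ [x]) x _ hmem).1
    have h2 : (pre ++ [x]).count x = pre.count x + 1 := by simp [List.count_append]
    rw [h2] at h1; push_cast at h1; omega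

lemma pvExpand_append_singleton (t : List String) : ∀ (pre : List String) (x : String),
    pvExpand pre (t ++ [x]) = pvExpand pre t ++ [(x, ((pre ++ t).count x : Int) + 1)] := by
  induction t with
  | nil => intro pre x; simp [pvExpand]
  | cons y t ih =>
    intro pre x
    simp only [List.cons_append, pvExpand, List.cons_append]
    rw [ih (pre ++ [y]) x, List.append_assoc]
    rfl

-- A's fold, characterised: with the dict holding the counts of `pre` and the set holding pairs
-- bounded by `pre`'s counts, folding over `suf` appends exactly `pvExpand pre suf`.
lemma pvA_fold (suf : List String) : ∀ (pre : List String) (d : PySem.Dict String Int)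
    (s : PySem.Set (String × Int)),
    (∀ w, d.getD w 0 = (pre.count w : Int)) →
    (∀ w, d.contains w = decide (w ∈ pre)) →
    (∀ w k, (w, k) ∈ s → 1 ≤ k ∧ k ≤ (pre.count w : Int)) →
    (suf.foldl
      (fun (st : PySem.Dict String Int × PySem.Set (String × Int)) (word : String) =>
        let wc := if st.1.contains word then st.1.modify word 0 (· + 1) else st.1.insert word 1
        (wc, PySem.Set.add st.2 (word, wc.getD word 0)))
      (d, s)).2 = s ++ pvExpand pre suf := by
  induction suf with
  | nil => intro pre d s _ _ _; simp [pvExpand]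
  | cons x t ih =>
    intro pre d s hd hc hs
    simp only [List.foldl_cons]
    set wc := if d.contains x then d.modify x 0 (· + 1) else d.insert x 1 with hwc
    have hval : wc.getD x 0 = (pre.count x : Int) + 1 := by
      rw [hwc]; by_cases h : x ∈ pre
      · rw [if_pos (by simp [hc, h]), PySem.Dict.getD_modify]
        simp [hd]
      · rw [if_neg (by simp [hc, h]), PySem.Dict.getD_insert]
        simp [List.count_eq_zero_of_not_mem h]
    have hcnt : ∀ w, w ≠ x → (pre ++ [x]).count w = pre.count w := by
      intro w hwx
      rw [List.count_append, List.count_singleton, if_neg (by simp [Ne.symm hwx])]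
      omega
    have hcntx : (pre ++ [x]).count x = pre.count x + 1 := by simp [List.count_append]
    have hd' : ∀ w, wc.getD w 0 = ((pre ++ [x]).count w : Int) := by
      intro w
      by_cases hwx : w = x
      · subst hwx; rw [hval, hcntx]; push_cast; ring
      · rw [hcnt w hwx, hwc]
        by_cases h : d.contains x
        · rw [if_pos h, PySem.Dict.getD_modify, if_neg hwx, hd]
        · rw [if_neg h, PySem.Dict.getD_insert, if_neg hwx, hd]
    have hc' : ∀ w, wc.contains w = decide (w ∈ pre ++ [x]) := by
      intro w
      rw [hwc]
      by_cases h : d.contains x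
      · rw [if_pos h, PySem.Dict.contains_modify, hc]
        by_cases hwx : w = x <;> simp [hwx]
      · rw [if_neg h, PySem.Dict.contains_insert, hc]
        by_cases hwx : w = x <;> simp [hwx]
    have hfresh : (x, wc.getD x 0) ∉ s := by
      rw [hval]; intro hmem
      have := (hs x _ hmem).2; omega
    rw [PySem.Set.add_of_not_mem hfresh]
    have hs' : ∀ w k, (w, k) ∈ s ++ [(x, wc.getD x 0)] → 1 ≤ k ∧ k ≤ ((pre ++ [x]).count w : Int) := by
      intro w k hmem
      rcases List.mem_append.mp hmem with hmem | hmem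
      · obtain ⟨h1, h2⟩ := hs w k hmem
        have hle : pre.count w ≤ (pre ++ [x]).count w := by simp [List.count_append]
        exact ⟨h1, by omega⟩
      · simp only [List.mem_singleton, Prod.mk.injEq] at hmem
        obtain ⟨rfl, rfl⟩ := hmem
        rw [hval, hcntx]; push_cast; omega
    rw [ih (pre ++ [x]) wc (s ++ [(x, wc.getD x 0)]) hd' hc' hs']
    rw [hval]
    simp [pvExpand]

-- B's counting pass: the dict built by `d.insert w (d.getD w 0 + 1)` holds the total counts.
lemma pvB_counts (words : List String) (w : String) :
    (words.foldl
      (fun (d : PySem.Dict String Int) (word : String) => d.insert word (d.getD word 0 + 1))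
      PySem.Dict.empty).getD w 0 = (words.count w : Int) := by
  rw [PySem.Dict.foldl_insert_getD_add_one_eq_counter, PySem.Dict.getD_counter]

-- B's reverse pass, characterised: with the dict holding the counts of `pre ++ suf`, folding over
-- `suf.reverse` appends exactly `(pvExpand pre suf).reverse` and leaves the counts of `pre`.
lemma pvB_fold (suf : List String) : ∀ (pre : List String) (acc : List (String × Int))
    (d : PySem.Dict String Int),
    (∀ w, d.getD w 0 = ((pre ++ suf).count w : Int)) →
    (suf.reverse.foldl
      (fun (st : List (String × Int) × PySem.Dict String Int) (word : String) =>
        (st.1 ++ [(word, st.2.getD word 0)], st.2.insert word (st.2.getD word 0 - 1)))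
      (acc, d)).1 = acc ++ (pvExpand pre suf).reverse := by
  induction suf using List.reverseRecOn with
  | nil => intro pre acc d _; simp [pvExpand]
  | append_singleton t x ih =>
    intro pre acc d hd
    rw [List.reverse_append, List.reverse_singleton, List.singleton_append, List.foldl_cons]
    have hvx : d.getD x 0 = ((pre ++ t).count x : Int) + 1 := by
      rw [hd x, ← List.append_assoc]
      have : ((pre ++ t) ++ [x]).count x = (pre ++ t).count x + 1 := by
        simp [List.count_append]; omega
      rw [this]; push_cast; ring
    have hd' : ∀ w, (d.insert x (d.getD x 0 - 1)).getD w 0 = ((pre ++ t).count w : Int) := by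
      intro w
      rw [PySem.Dict.getD_insert]
      by_cases hwx : w = x
      · rw [if_pos hwx, hvx]; subst hwx; ring
      · rw [if_neg hwx, hd w, ← List.append_assoc]
        have : ((pre ++ t) ++ [x]).count w = (pre ++ t).count w := by
          rw [List.count_append, List.count_singleton, if_neg (by simp [Ne.symm hwx])]
          omega
        rw [this]
    rw [ih pre (acc ++ [(x, d.getD x 0)]) (d.insert x (d.getD x 0 - 1)) hd']
    rw [pvExpand_append_singleton, List.reverse_append, List.reverse_singleton, hvx]
    simp

-- ===== VERDICT (by name: the statement is the Claim_ definition above) =====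
theorem get_words_with_count_spec : Claim_equal_get_words_with_count := by
  intro sentence _
  unfold Spec_get_words_with_count get_words_with_count get_words_with_count_alt
  dsimp only
  generalize PySem.Str.split₀ (PySem.Str.lower sentence) = words
  have hA := pvA_fold words [] PySem.Dict.empty PySem.Set.empty
    (by intro w; simp [PySem.Dict.getD_empty])
    (by intro w; simp [PySem.Dict.contains_empty])
    (by intro w k h; simp [PySem.Set.empty] at h)
  have hB := pvB_fold words [] []
    (words.foldl
      (fun (d : PySem.Dict String Int) (word : String) => d.insert word (d.getD word 0 + 1))
      PySem.Dict.empty)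
    (by intro w; rw [pvB_counts]; simp)
  simp only [List.nil_append] at hA hB
  rw [hA, hB, List.reverse_reverse,
    PySem.Set.ofList_eq_self_of_nodup _ (pvExpand_nodup words []), PySem.Set.empty]
  simp
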